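-- pv_equiv track=rewrite | github.com/15025639392/xiao_yan | services/core/app/main.py | _merge_chat_stream_content
-- ===== SOURCE A (Python) =====
-- def _merge_chat_stream_content(current_content: str, delta: str) -> str:
--     if not current_content:
--         return delta
--
--     if not delta:
--         return current_content
--
--     if delta.startswith(current_content):
--         return delta
--
--     if current_content.startswith(delta) or delta in current_content:
--         return current_content
--
--     max_overlap = min(len(current_content), len(delta))
--     for overlap in range(max_overlap, 0, -1):
--         if current_content[-overlap:] == delta[:overlap]:
--             return f"{current_content}{delta[overlap:]}"
--
--     return f"{current_content}{delta}"
-- ===== SOURCE B (Python) =====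
-- def _merge_chat_stream_content(current_content: str, delta: str) -> str:
--     if not current_content:
--         return delta
--     if not delta:
--         return current_content
--     if delta.startswith(current_content):
--         return delta
--     if delta in current_content:
--         return current_content
--     # scan only positions in current_content's tail where delta's first char occurs
--     first = delta[0]
--     i = current_content.find(first, len(current_content) - min(len(current_content), len(delta)))
--     while i != -1:
--         if delta.startswith(current_content[i:]):
--             return current_content + delta[len(current_content) - i:]
--         i = current_content.find(first, i + 1)
--     return current_content + delta
-- ===== Notes on version B (the rewrite author's own statement) =====
-- stated objective: faster
-- what changed: A tries every overlap length from largest to smallest with a full slice comparison each time; B scans only the positions where delta's first character occurs in current_content's tail, jumping between candidate positions with C-level str.find, so non-candidate overlap lengths are never sliced or compared.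
import Mathlib
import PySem

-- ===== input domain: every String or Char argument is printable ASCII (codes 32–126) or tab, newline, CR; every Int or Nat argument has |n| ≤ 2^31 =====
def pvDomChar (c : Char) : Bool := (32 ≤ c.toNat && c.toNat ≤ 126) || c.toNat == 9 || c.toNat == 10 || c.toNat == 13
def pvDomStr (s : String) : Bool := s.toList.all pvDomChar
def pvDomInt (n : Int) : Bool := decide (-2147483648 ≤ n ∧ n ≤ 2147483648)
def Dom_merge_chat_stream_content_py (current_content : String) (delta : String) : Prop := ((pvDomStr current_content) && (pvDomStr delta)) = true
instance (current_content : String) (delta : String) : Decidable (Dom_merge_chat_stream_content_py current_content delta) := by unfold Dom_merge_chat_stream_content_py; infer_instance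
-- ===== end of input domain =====

-- B replaces A's descending scan over all overlap lengths by a str.find-driven scan over the
-- positions of delta's first character in current_content's tail (objective: alternative).

-- ===== PORT A =====
-- for overlap in range(max_overlap, 0, -1): visits overlap = k+1, k, …, 1; the 0 case is the
-- exhausted loop (return f"{current_content}{delta}")
def mergeLoopA (cl dl : List Char) : Nat → List Char
  | 0 => cl ++ dl
  | k + 1 =>
      if PySem.List.slice cl (some (-((k + 1 : Nat) : Int))) none
           = PySem.List.slice dl none (some ((k + 1 : Nat) : Int))
      then cl ++ PySem.List.slice dl (some ((k + 1 : Nat) : Int)) none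
      else mergeLoopA cl dl k

def merge_chat_stream_content_py (current_content : String) (delta : String) : String :=
  if current_content.toList = [] then delta
  else if delta.toList = [] then current_content
  else if PySem.Chars.startswith delta.toList current_content.toList then delta
  else if PySem.Chars.startswith current_content.toList delta.toList
          || PySem.Chars.isIn delta.toList current_content.toList then current_content
  else String.ofList (mergeLoopA current_content.toList delta.toList
          (min current_content.toList.length delta.toList.length))

-- ===== PORT B =====
-- while i != -1: check candidate position i, then i = current_content.find(first, i + 1).
-- fuel = cl.length + 1 is a totality guard only: each find() result is strictly larger than the
-- previous position, so the guard is never reached (the equivalence proof covers all inputs).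
def mergeScanB (cl dl : List Char) (first : Char) : Nat → Int → List Char
  | 0, _ => cl ++ dl
  | fuel + 1, i =>
      if i = -1 then cl ++ dl
      else if PySem.Chars.startswith dl (PySem.List.slice cl (some i) none)
      then cl ++ PySem.List.slice dl (some ((cl.length : Int) - i)) none
      else mergeScanB cl dl first fuel (PySem.Chars.findFrom cl [first] (i + 1) none)

def merge_chat_stream_content_py_alt (current_content : String) (delta : String) : String :=
  if current_content.toList = [] then delta
  else if delta.toList = [] then current_content
  else if PySem.Chars.startswith delta.toList current_content.toList then delta
  else if PySem.Chars.isIn delta.toList current_content.toList then current_content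
  else
    String.ofList (mergeScanB current_content.toList delta.toList
      (delta.toList.headD ' ')
      (current_content.toList.length + 1)
      (PySem.Chars.findFrom current_content.toList [delta.toList.headD ' ']
        ((current_content.toList.length
            - min current_content.toList.length delta.toList.length : Nat) : Int) none))

-- ===== PRECONDITION & SPEC =====
def Spec_merge_chat_stream_content_py (current_content : String) (delta : String) (out : String) : Prop := out = merge_chat_stream_content_py_alt current_content delta
instance (current_content : String) (delta : String) (out : String) : Decidable (Spec_merge_chat_stream_content_py current_content delta out) := by unfold Spec_merge_chat_stream_content_py; infer_instance

-- ===== CLAIM (what is proved, stated in full; the proofs are below) =====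
def Claim_equal_merge_chat_stream_content_py : Prop := ∀ (current_content : String) (delta : String), Dom_merge_chat_stream_content_py current_content delta → Spec_merge_chat_stream_content_py current_content delta (merge_chat_stream_content_py current_content delta)

-- ===== LEMMAS AND PROOFS =====

-- a 1-character prefix found at position t ≥ s is an infix of the drop at s
lemma pvInfix_drop_of_prefix_drop {first : Char} {cl : List Char} {s t : Nat}
    (hst : s ≤ t) (h : [first] <+: cl.drop t) : [first] <:+: cl.drop s := by
  have hd : cl.drop t = (cl.drop s).drop (t - s) := by
    rw [List.drop_drop]; congr 1; omega
  rw [hd] at h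
  exact h.isInfix.trans (List.drop_suffix _ _).isInfix

-- an overlap match forces delta's first character at the matching position
lemma pvNoMatch_of_not_prefix {cl dl : List Char} {first : Char} {k : Nat}
    (hk : 1 ≤ k) (hdne : dl ≠ []) (hfirst : dl.headD ' ' = first)
    (hnp : ¬ [first] <+: cl.drop (cl.length - k)) :
    ¬ cl.drop (cl.length - k) = dl.take k := by
  intro h
  apply hnp
  rw [h]
  cases dl with
  | nil => exact absurd rfl hdne
  | cons a tl =>
    obtain ⟨k', rfl⟩ : ∃ k', k = k' + 1 := ⟨k - 1, by omega⟩
    simp at hfirst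
    simp [List.take_succ_cons, hfirst]

-- A's loop skips every failing overlap length
lemma pvSkipA (cl dl : List Char) (K K' : Nat) (hle : K' ≤ K)
    (h : ∀ k, K' < k → k ≤ K → ¬ cl.drop (cl.length - k) = dl.take k) :
    mergeLoopA cl dl K = mergeLoopA cl dl K' := by
  induction K with
  | zero => have : K' = 0 := by omega
            simp [this]
  | succ K0 ih =>
    by_cases hK : K' = K0 + 1
    · simp [hK]
    · have hcond : ¬ cl.drop (cl.length - (K0 + 1)) = dl.take (K0 + 1) :=
        h (K0 + 1) (by omega) (by omega)
      rw [show mergeLoopA cl dl (K0 + 1)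
            = if PySem.List.slice cl (some (-((K0 + 1 : Nat) : Int))) none
                 = PySem.List.slice dl none (some ((K0 + 1 : Nat) : Int))
              then cl ++ PySem.List.slice dl (some ((K0 + 1 : Nat) : Int)) none
              else mergeLoopA cl dl K0 from rfl]
      rw [PySem.List.slice_from_neg_natCast cl (K0 + 1) (by omega),
          PySem.List.slice_to_natCast]
      rw [if_neg hcond]
      exact ih (by omega) (fun k h1 h2 => h k h1 (by omega))

-- main bridge: B's find-driven scan from position s computes A's loop at overlap cl.length - s
lemma pvScanEqLoop (cl dl : List Char) (first : Char)
    (hdne : dl ≠ []) (hfirst : dl.headD ' ' = first)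
    (fuel s : Nat)
    (hs1 : cl.length - min cl.length dl.length ≤ s) (hs2 : s ≤ cl.length)
    (hfuel : cl.length + 1 - s ≤ fuel) :
    mergeScanB cl dl first fuel (PySem.Chars.findFrom cl [first] (s : Int) none)
      = mergeLoopA cl dl (cl.length - s) := by
  induction fuel generalizing s with
  | zero => omega
  | succ f ih =>
    by_cases hj : PySem.Chars.findFrom cl [first] (s : Int) none = -1
    · have hninf : ¬ [first] <:+: cl.drop s :=
        (PySem.Chars.findFrom_natCast_eq_neg_one_iff cl [first] s hs2).mp hj
      rw [hj]
      simp only [mergeScanB, if_pos]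
      rw [pvSkipA cl dl (cl.length - s) 0 (by omega) ?_]
      · rfl
      · intro k h1 h2
        refine pvNoMatch_of_not_prefix (by omega) hdne hfirst (fun hpre => hninf ?_)
        exact pvInfix_drop_of_prefix_drop (by omega) hpre
    · obtain ⟨hsle, hpre, hmin⟩ :=
        PySem.Chars.findFrom_natCast_spec cl [first] s hs2 hj
      have hj0 : (0 : Int) ≤ PySem.Chars.findFrom cl [first] (s : Int) none := by
        have : (0 : Int) ≤ (s : Int) := by positivity
        omega
      set jn := (PySem.Chars.findFrom cl [first] (s : Int) none).toNat with hjn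
      have hjeq : PySem.Chars.findFrom cl [first] (s : Int) none = (jn : Int) :=
        (Int.toNat_of_nonneg hj0).symm
      have hsjn : s ≤ jn := by omega
      have hjn_lt : jn < cl.length := by
        have hne : cl.drop jn ≠ [] := by
          intro h0; rw [h0] at hpre; simp at hpre
        rw [ne_eq, List.drop_eq_nil_iff] at hne; omega
      rw [hjeq]
      simp only [mergeScanB]
      rw [if_neg (by omega : ¬ ((jn : Int) = -1))]
      rw [PySem.List.slice_from_natCast]
      -- skip the overlaps strictly between position s and position jn on A's side
      rw [pvSkipA cl dl (cl.length - s) (cl.length - jn) (by omega) ?_]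
      · obtain ⟨k', hk'⟩ : ∃ k', cl.length - jn = k' + 1 := ⟨cl.length - jn - 1, by omega⟩
        rw [hk']
        rw [show mergeLoopA cl dl (k' + 1)
              = if PySem.List.slice cl (some (-((k' + 1 : Nat) : Int))) none
                   = PySem.List.slice dl none (some ((k' + 1 : Nat) : Int))
                then cl ++ PySem.List.slice dl (some ((k' + 1 : Nat) : Int)) none
                else mergeLoopA cl dl k' from rfl]
        rw [PySem.List.slice_from_neg_natCast cl (k' + 1) (by omega),
            PySem.List.slice_to_natCast]
        have hpos : cl.length - (k' + 1) = jn := by omega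
        rw [hpos]
        have hPiff : (PySem.Chars.startswith dl (cl.drop jn) = true)
            ↔ (cl.drop jn = dl.take (k' + 1)) := by
          rw [PySem.Chars.startswith_iff, List.prefix_iff_eq_take, List.length_drop, hk']
        by_cases hC : cl.drop jn = dl.take (k' + 1)
        · rw [if_pos (hPiff.mpr hC), if_pos hC]
          rw [show ((cl.length : Int) - (jn : Int)) = (((k' + 1 : Nat)) : Int) by omega]
        · rw [if_neg (fun h => hC (hPiff.mp h)), if_neg hC]
          rw [show ((jn : Int) + 1) = (((jn + 1 : Nat)) : Int) by push_cast; ring]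
          rw [ih (jn + 1) (by omega) (by omega) (by omega)]
          congr 1
          omega
      · intro k h1 h2
        refine pvNoMatch_of_not_prefix (by omega) hdne hfirst ?_
        exact hmin (cl.length - k) (by omega) (by omega)

-- the two ports agree on every input
lemma pvPortsEq (c d : String) :
    merge_chat_stream_content_py c d = merge_chat_stream_content_py_alt c d := by
  unfold merge_chat_stream_content_py merge_chat_stream_content_py_alt
  by_cases h1 : c.toList = []
  · rw [if_pos h1, if_pos h1]
  rw [if_neg h1, if_neg h1]
  by_cases h2 : d.toList = []
  · rw [if_pos h2, if_pos h2]
  rw [if_neg h2, if_neg h2]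
  by_cases h3 : PySem.Chars.startswith d.toList c.toList
  · rw [if_pos h3, if_pos h3]
  rw [if_neg h3, if_neg h3]
  by_cases h4 : PySem.Chars.isIn d.toList c.toList
  · rw [if_pos (by simp [h4]), if_pos h4]
  have h5 : PySem.Chars.startswith c.toList d.toList = false := by
    by_contra h
    rw [Bool.not_eq_false, PySem.Chars.startswith_iff] at h
    exact absurd ((PySem.Chars.isIn_iff_infix _ _).mpr h.isInfix) h4
  rw [if_neg (by simp [h4, h5]), if_neg h4]
  congr 1
  rw [pvScanEqLoop c.toList d.toList (d.toList.headD ' ') h2 rfl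
        (c.toList.length + 1)
        (c.toList.length - min c.toList.length d.toList.length)
        (by omega) (by omega) (by omega)]
  congr 1
  omega

-- ===== VERDICT (by name: the statement is the Claim_ definition above) =====
theorem merge_chat_stream_content_py_spec : Claim_equal_merge_chat_stream_content_py := by
  intro c d _
  exact pvPortsEq c d
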